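-- pv_equiv track=rewrite | github.com/DragonOfTheEast/kattisProblems | chewbacca.py | _solve
-- ===== SOURCE A (Python) =====
-- def _solve(i,j,k):
--     levels = 0
--     while i != j:
--         if i > j:
--             i,j = j,i
--         j = (j-1)//k
--         levels += 1
--     return levels
-- ===== SOURCE B (Python) =====
-- def _solve(i, j, k):
--     if i == j:
--         return 0
--
--     def depth(x):
--         d = 0
--         while x != 0:
--             x = (x - 1) // k
--             d += 1
--         return d
--
--     def lift(x, n):
--         for _ in range(n):
--             x = (x - 1) // k
--         return x
--
--     di = depth(i)
--     dj = depth(j)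
--     steps = abs(di - dj)
--     if di > dj:
--         i = lift(i, di - dj)
--     else:
--         j = lift(j, dj - di)
--     while i != j:
--         i = (i - 1) // k
--         j = (j - 1) // k
--         steps += 2
--     return steps
-- ===== Notes on version B (the rewrite author's own statement) =====
-- stated objective: alternative
-- what changed: B computes the depth of each node, lifts the deeper node to the shallower node's depth, then lifts both nodes in lockstep until they meet, instead of A's loop that repeatedly re-compares the pair and lifts the larger index one step at a time.
-- outside the precondition, e.g. on _solve(-1, 5, 2): A returns 3, B does not finish within the time limit
import Mathlib
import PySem

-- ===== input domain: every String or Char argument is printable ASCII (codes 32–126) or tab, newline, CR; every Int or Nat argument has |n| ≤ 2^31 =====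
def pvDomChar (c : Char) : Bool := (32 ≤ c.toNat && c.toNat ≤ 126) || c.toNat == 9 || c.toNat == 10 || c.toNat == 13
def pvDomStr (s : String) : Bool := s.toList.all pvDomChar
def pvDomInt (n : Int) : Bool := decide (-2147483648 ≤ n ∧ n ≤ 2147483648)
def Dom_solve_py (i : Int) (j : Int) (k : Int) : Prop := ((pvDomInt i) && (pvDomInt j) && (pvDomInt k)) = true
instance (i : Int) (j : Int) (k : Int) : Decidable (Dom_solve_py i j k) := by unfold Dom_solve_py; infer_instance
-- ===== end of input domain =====

-- B replaces A's lift-the-larger-index loop by a depth-leveling decomposition (alternative, same cost).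


-- parent step (x-1)//k stays in range and decreases; used by the ports' termination proofs
theorem pv_par_bounds (x k : Int) (hk : 1 ≤ k) (hx : 1 ≤ x) :
    0 ≤ PySem.Int.floordiv (x - 1) k ∧ PySem.Int.floordiv (x - 1) k < x := by
  rw [PySem.Int.floordiv_eq_ediv_of_pos (by omega)]
  have h1 : 0 ≤ (x - 1) / k := Int.ediv_nonneg (by omega) (by omega)
  have h2 : (x - 1) / k ≤ x - 1 := Int.ediv_le_self k (by omega)
  omega

-- ===== PORT A =====
-- while i != j: swap so i ≤ j, lift j, count.  Outside 1 ≤ k ∧ 0 ≤ i ∧ 0 ≤ j the Python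
-- raises or loops forever; the guard only makes the recursion total (junk value there).
def solveA (i : Int) (j : Int) (k : Int) (levels : Int) : Int :=
  if i = j then levels
  else if h : 1 ≤ k ∧ 0 ≤ i ∧ 0 ≤ j then
    if i > j then solveA j (PySem.Int.floordiv (i - 1) k) k (levels + 1)
    else solveA i (PySem.Int.floordiv (j - 1) k) k (levels + 1)
  else levels
termination_by i.toNat + j.toNat
decreasing_by
  · have := pv_par_bounds i k h.1 (by omega)
    omega
  · have hj1 : 1 ≤ j := by omega
    have := pv_par_bounds j k h.1 hj1
    omega

def solve_py (i : Int) (j : Int) (k : Int) : Int := solveA i j k 0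

-- ===== PORT B =====
-- depth(x): parent steps until 0; guard only for totality (Python loops forever on negative x)
def depthB (x : Int) (k : Int) : Int :=
  if x = 0 then 0
  else if h : 1 ≤ k ∧ 1 ≤ x then depthB (PySem.Int.floordiv (x - 1) k) k + 1
  else 0
termination_by x.toNat
decreasing_by
  have := pv_par_bounds x k h.1 h.2
  omega

-- lift(x, n): apply the parent step n times
def liftB (x : Int) (k : Int) (n : Int) : Int :=
  if h : 1 ≤ n then liftB (PySem.Int.floordiv (x - 1) k) k (n - 1) else x
termination_by n.toNat
decreasing_by omega

-- while i != j: lift both, count 2; guard only for totality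
def bothUp (i : Int) (j : Int) (k : Int) (steps : Int) : Int :=
  if i = j then steps
  else if h : 1 ≤ k ∧ 1 ≤ i ∧ 1 ≤ j then
    bothUp (PySem.Int.floordiv (i - 1) k) (PySem.Int.floordiv (j - 1) k) k (steps + 2)
  else steps
termination_by i.toNat
decreasing_by
  have := pv_par_bounds i k h.1 h.2.1
  omega

def solve_py_alt (i : Int) (j : Int) (k : Int) : Int :=
  if i = j then 0
  else
    let di := depthB i k
    let dj := depthB j k
    let steps := |di - dj|
    if di > dj then bothUp (liftB i k (di - dj)) j k steps
    else bothUp i (liftB j k (dj - di)) k steps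

-- ===== PRECONDITION & SPEC =====
-- Pre_ excludes the inputs with a negative index or k < 1 (unless i == j): there A raises
-- ZeroDivisionError, loops forever, or returns only by accidentally converging at -1,
-- while B's depth computation diverges.
def Pre_solve_py (i : Int) (j : Int) (k : Int) : Prop :=
  i = j ∨ (0 ≤ i ∧ 0 ≤ j ∧ 1 ≤ k)
instance (i : Int) (j : Int) (k : Int) : Decidable (Pre_solve_py i j k) := by
  unfold Pre_solve_py; infer_instance
def pvWitness_solve_py : Int × Int × Int := (5, 2, 3)

def Spec_solve_py (i : Int) (j : Int) (k : Int) (out : Int) : Prop := out = solve_py_alt i j k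
instance (i : Int) (j : Int) (k : Int) (out : Int) : Decidable (Spec_solve_py i j k out) := by
  unfold Spec_solve_py; infer_instance

-- ===== CLAIM (what is proved, stated in full; the proofs are below) =====
def Claim_equal_solve_py : Prop := ∀ (i : Int) (j : Int) (k : Int), Dom_solve_py i j k → Pre_solve_py i j k → Spec_solve_py i j k (solve_py i j k)

-- ===== LEMMAS AND PROOFS =====

theorem depthB_nonneg_aux : ∀ (N : Nat) (x k : Int), x.toNat ≤ N → 0 ≤ depthB x k := by
  intro N
  induction N with
  | zero =>
    intro x k hN
    rw [depthB]
    split_ifs with h1 h2 <;> omega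
  | succ n ih =>
    intro x k hN
    rw [depthB]
    split_ifs with h1 h2
    · omega
    · have hp := pv_par_bounds x k h2.1 h2.2
      have := ih (PySem.Int.floordiv (x - 1) k) k (by omega)
      omega
    · omega

theorem depthB_nonneg (x k : Int) : 0 ≤ depthB x k :=
  depthB_nonneg_aux x.toNat x k (le_refl _)

theorem depthB_zero (k : Int) : depthB 0 k = 0 := by
  rw [depthB]; simp

theorem depthB_step (x k : Int) (hk : 1 ≤ k) (hx : 1 ≤ x) :
    depthB x k = depthB (PySem.Int.floordiv (x - 1) k) k + 1 := by
  rw [depthB]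
  simp only [if_neg (show ¬ x = 0 by omega), dif_pos (⟨hk, hx⟩ : 1 ≤ k ∧ 1 ≤ x)]

theorem depthB_pos (x k : Int) (hk : 1 ≤ k) (hx : 1 ≤ x) : 1 ≤ depthB x k := by
  rw [depthB_step x k hk hx]
  have := depthB_nonneg (PySem.Int.floordiv (x - 1) k) k
  omega

theorem depthB_mono (k : Int) (hk : 1 ≤ k) :
    ∀ (N : Nat) (a b : Int), b.toNat ≤ N → 0 ≤ a → a ≤ b → depthB a k ≤ depthB b k := by
  intro N
  induction N with
  | zero =>
    intro a b hN ha hab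
    have : a = b := by omega
    subst this; exact le_refl _
  | succ n ih =>
    intro a b hN ha hab
    rcases eq_or_lt_of_le hab with h | h
    · subst h; exact le_refl _
    · have hb1 : 1 ≤ b := by omega
      rcases eq_or_lt_of_le ha with h0 | h0
      · rw [← h0, depthB_zero]
        exact depthB_nonneg b k
      · have ha1 : 1 ≤ a := by omega
        rw [depthB_step a k hk ha1, depthB_step b k hk hb1]
        have hpa := pv_par_bounds a k hk ha1
        have hpb := pv_par_bounds b k hk hb1
        have hmono : PySem.Int.floordiv (a - 1) k ≤ PySem.Int.floordiv (b - 1) k := by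
          rw [PySem.Int.floordiv_eq_ediv_of_pos (by omega),
              PySem.Int.floordiv_eq_ediv_of_pos (by omega)]
          exact Int.ediv_le_ediv (by omega) (by omega)
        have := ih (PySem.Int.floordiv (a - 1) k) (PySem.Int.floordiv (b - 1) k)
          (by omega) hpa.1 hmono
        omega

-- depth strictly smaller forces a smaller index
theorem lt_of_depth_lt (a b k : Int) (hk : 1 ≤ k) (_ha : 0 ≤ a) (hb : 0 ≤ b)
    (h : depthB a k < depthB b k) : a < b := by
  by_contra hc
  have : depthB b k ≤ depthB a k := depthB_mono k hk a.toNat b a (by omega) hb (by omega)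
  omega

theorem liftB_spec (k : Int) (hk : 1 ≤ k) :
    ∀ (n : Nat) (x : Int), 0 ≤ x → (n : Int) ≤ depthB x k →
      0 ≤ liftB x k n ∧ depthB (liftB x k n) k = depthB x k - n := by
  intro n
  induction n with
  | zero =>
    intro x hx _
    rw [liftB]
    simp only [Nat.cast_zero]
    rw [dif_neg (by omega)]
    exact ⟨hx, by omega⟩
  | succ m ih =>
    intro x hx hd
    have hx1 : 1 ≤ x := by
      by_contra hc
      have : x = 0 := by omega
      subst this
      rw [depthB_zero] at hd; omega
    have hp := pv_par_bounds x k hk hx1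
    have hstep := depthB_step x k hk hx1
    rw [liftB]
    rw [dif_pos (by push_cast; omega)]
    have harg : ((m + 1 : Nat) : Int) - 1 = (m : Int) := by push_cast; omega
    rw [harg]
    have := ih (PySem.Int.floordiv (x - 1) k) hp.1 (by push_cast at hd ⊢; omega)
    constructor
    · exact this.1
    · push_cast
      omega

-- one unfolding of the A-loop is symmetric in (i, j)
theorem solveA_comm (i j k l : Int) : solveA i j k l = solveA j i k l := by
  conv_lhs => rw [solveA]
  conv_rhs => rw [solveA]
  by_cases hij : i = j
  · simp [hij]
  · rw [if_neg hij, if_neg (Ne.symm hij)]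
    by_cases hg : 1 ≤ k ∧ 0 ≤ i ∧ 0 ≤ j
    · rw [dif_pos hg, dif_pos (by tauto)]
      rcases lt_or_gt_of_ne hij with h | h
      · rw [if_neg (by omega), if_pos (by omega)]
      · rw [if_pos (by omega), if_neg (by omega)]
    · rw [dif_neg hg, dif_neg (by tauto)]

-- the B-loop is symmetric in (i, j)
theorem bothUp_comm (k : Int) :
    ∀ (N : Nat) (i j l : Int), i.toNat + j.toNat ≤ N → bothUp i j k l = bothUp j i k l := by
  intro N
  induction N with
  | zero =>
    intro i j l hN
    conv_lhs => rw [bothUp]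
    conv_rhs => rw [bothUp]
    by_cases hij : i = j
    · simp [hij]
    · rw [if_neg hij, if_neg (Ne.symm hij)]
      rw [dif_neg (by omega), dif_neg (by omega)]
  | succ n ih =>
    intro i j l hN
    conv_lhs => rw [bothUp]
    conv_rhs => rw [bothUp]
    by_cases hij : i = j
    · simp [hij]
    · rw [if_neg hij, if_neg (Ne.symm hij)]
      by_cases hg : 1 ≤ k ∧ 1 ≤ i ∧ 1 ≤ j
      · rw [dif_pos hg, dif_pos (by tauto)]
        have hpi := pv_par_bounds i k hg.1 hg.2.1
        have hpj := pv_par_bounds j k hg.1 hg.2.2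
        exact ih _ _ _ (by omega)
      · rw [dif_neg hg, dif_neg (by tauto)]

-- leveling: lifting the deeper node n times matches n steps of A's loop
theorem levelA (k : Int) (hk : 1 ≤ k) :
    ∀ (n : Nat) (i j l : Int), 0 ≤ i → 0 ≤ j → depthB i k + n = depthB j k →
      solveA i j k l = solveA i (liftB j k n) k (l + n) := by
  intro n
  induction n with
  | zero =>
    intro i j l hi hj hd
    rw [liftB]
    simp only [Nat.cast_zero]
    rw [dif_neg (by omega)]
    norm_num
  | succ m ih =>
    intro i j l hi hj hd
    have hdij : depthB i k < depthB j k := by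
      have := depthB_nonneg i k; push_cast at hd; omega
    have hij : i < j := lt_of_depth_lt i j k hk hi hj hdij
    have hj1 : 1 ≤ j := by omega
    have hp := pv_par_bounds j k hk hj1
    have hstep := depthB_step j k hk hj1
    rw [solveA]
    rw [if_neg (by omega), dif_pos (⟨hk, hi, hj⟩ : 1 ≤ k ∧ 0 ≤ i ∧ 0 ≤ j),
        if_neg (by omega)]
    rw [liftB]
    rw [dif_pos (by push_cast; omega)]
    have harg : ((m + 1 : Nat) : Int) - 1 = (m : Int) := by push_cast; omega
    rw [harg]
    have := ih i (PySem.Int.floordiv (j - 1) k) (l + 1) hi hp.1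
      (by push_cast at hd ⊢; omega)
    rw [this]
    congr 1
    push_cast
    omega

-- equal depths: A's loop and B's lockstep loop count identically
theorem mainEq (k : Int) (hk : 1 ≤ k) :
    ∀ (N : Nat) (i j l : Int), i.toNat + j.toNat ≤ N → 0 ≤ i → 0 ≤ j →
      depthB i k = depthB j k → solveA i j k l = bothUp i j k l := by
  intro N
  induction N with
  | zero =>
    intro i j l hN hi hj hd
    have : i = j := by omega
    subst this
    rw [solveA, bothUp]; simp
  | succ n ih =>
    intro i j l hN hi hj hd
    by_cases hij : i = j
    · subst hij
      rw [solveA, bothUp]; simp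
    · have hi1 : 1 ≤ i := by
        by_contra hc
        have : i = 0 := by omega
        subst this
        have : 1 ≤ j := by omega
        have := depthB_pos j k hk this
        rw [depthB_zero] at hd; omega
      have hj1 : 1 ≤ j := by
        by_contra hc
        have : j = 0 := by omega
        subst this
        have := depthB_pos i k hk hi1
        rw [depthB_zero] at hd; omega
      have hpi := pv_par_bounds i k hk hi1
      have hpj := pv_par_bounds j k hk hj1
      have hsi := depthB_step i k hk hi1
      have hsj := depthB_step j k hk hj1
      have hIH : solveA (PySem.Int.floordiv (i - 1) k) (PySem.Int.floordiv (j - 1) k) k (l + 2)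
          = bothUp (PySem.Int.floordiv (i - 1) k) (PySem.Int.floordiv (j - 1) k) k (l + 2) :=
        ih _ _ _ (by omega) hpi.1 hpj.1 (by omega)
      have hBU : bothUp i j k l
          = bothUp (PySem.Int.floordiv (i - 1) k) (PySem.Int.floordiv (j - 1) k) k (l + 2) := by
        rw [bothUp]
        rw [if_neg hij, dif_pos (⟨hk, hi1, hj1⟩ : 1 ≤ k ∧ 1 ≤ i ∧ 1 ≤ j)]
      rcases lt_or_gt_of_ne hij with hlt | hgt
      · -- i < j: A lifts j, then (depth forces) lifts i
        have hdpj : depthB (PySem.Int.floordiv (j - 1) k) k < depthB i k := by omega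
        have hpjlt : PySem.Int.floordiv (j - 1) k < i :=
          lt_of_depth_lt _ i k hk hpj.1 hi hdpj
        rw [solveA]
        rw [if_neg hij, dif_pos (⟨hk, hi, hj⟩ : 1 ≤ k ∧ 0 ≤ i ∧ 0 ≤ j), if_neg (by omega)]
        rw [solveA]
        rw [if_neg (by omega), dif_pos (⟨hk, hi, hpj.1⟩ : 1 ≤ k ∧ 0 ≤ i ∧ 0 ≤ PySem.Int.floordiv (j - 1) k),
            if_pos (by omega)]
        have h12 : l + 1 + 1 = l + 2 := by omega
        rw [h12, solveA_comm, hIH, hBU]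
      · -- i > j: A lifts i, then lifts j
        have hdpi : depthB (PySem.Int.floordiv (i - 1) k) k < depthB j k := by omega
        have hpilt : PySem.Int.floordiv (i - 1) k < j :=
          lt_of_depth_lt _ j k hk hpi.1 hj hdpi
        rw [solveA]
        rw [if_neg hij, dif_pos (⟨hk, hi, hj⟩ : 1 ≤ k ∧ 0 ≤ i ∧ 0 ≤ j), if_pos (by omega)]
        rw [solveA]
        rw [if_neg (by omega), dif_pos (⟨hk, hj, hpi.1⟩ : 1 ≤ k ∧ 0 ≤ j ∧ 0 ≤ PySem.Int.floordiv (i - 1) k),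
            if_pos (by omega)]
        have h12 : l + 1 + 1 = l + 2 := by omega
        rw [h12, hIH, hBU]

-- ===== VERDICT (by name: the statement is the Claim_ definition above) =====
theorem solve_py_spec : Claim_equal_solve_py := by
  intro i j k _ hpre
  unfold Spec_solve_py solve_py solve_py_alt
  by_cases hij : i = j
  · subst hij
    rw [solveA]; simp
  · rcases hpre with h | ⟨hi, hj, hk⟩
    · exact absurd h hij
    simp only [if_neg hij]
    have hdi := depthB_nonneg i k
    have hdj := depthB_nonneg j k
    by_cases hgt : depthB i k > depthB j k
    · rw [if_pos hgt]
      have habs : |depthB i k - depthB j k| = depthB i k - depthB j k := by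
        rw [abs_of_nonneg (by omega)]
      set n : Nat := (depthB i k - depthB j k).toNat with hn
      have hcast : (n : Int) = depthB i k - depthB j k := by omega
      have hlift := liftB_spec k hk n i hi (by omega)
      have h1 : solveA i j k 0 = solveA j i k 0 := solveA_comm i j k 0
      have h2 : solveA j i k 0 = solveA j (liftB i k n) k (0 + n) :=
        levelA k hk n j i 0 hj hi (by omega)
      rw [h1, h2, hcast]
      have h3 : solveA j (liftB i k (depthB i k - depthB j k)) k (0 + (depthB i k - depthB j k))
          = bothUp j (liftB i k (depthB i k - depthB j k)) k (0 + (depthB i k - depthB j k)) := by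
        apply mainEq k hk (j.toNat + (liftB i k (depthB i k - depthB j k)).toNat) _ _ _ (le_refl _) hj
        · rw [← hcast]; exact hlift.1
        · rw [← hcast]; omega
      rw [h3, habs]
      have h4 := bothUp_comm k (j.toNat + (liftB i k (depthB i k - depthB j k)).toNat)
        j (liftB i k (depthB i k - depthB j k)) (0 + (depthB i k - depthB j k)) (le_refl _)
      rw [h4]
      congr 1
      omega
    · rw [if_neg hgt]
      have habs : |depthB i k - depthB j k| = depthB j k - depthB i k := by
        rw [abs_of_nonpos (by omega)]; omega
      set n : Nat := (depthB j k - depthB i k).toNat with hn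
      have hcast : (n : Int) = depthB j k - depthB i k := by omega
      have hlift := liftB_spec k hk n j hj (by omega)
      have h2 : solveA i j k 0 = solveA i (liftB j k n) k (0 + n) :=
        levelA k hk n i j 0 hi hj (by omega)
      rw [h2, hcast]
      have h3 : solveA i (liftB j k (depthB j k - depthB i k)) k (0 + (depthB j k - depthB i k))
          = bothUp i (liftB j k (depthB j k - depthB i k)) k (0 + (depthB j k - depthB i k)) := by
        apply mainEq k hk (i.toNat + (liftB j k (depthB j k - depthB i k)).toNat) _ _ _ (le_refl _) hi
        · rw [← hcast]; exact hlift.1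
        · rw [← hcast]; omega
      rw [h3, habs]
      congr 1
      omega
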